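-- pv_equiv track=rewrite | github.com/nextgenaiworksgunanidhi-sudo/data-lineage-agent | tools/ast-scanner.py | _detect_batch_role
-- ===== SOURCE A (Python) =====
-- BATCH_READER_IFACES    = {"ItemReader", "ItemStreamReader", "FlatFileItemReader",
--                            "JdbcCursorItemReader", "JpaPagingItemReader",
--                            "JdbcPagingItemReader", "RepositoryItemReader"}
--
-- BATCH_PROCESSOR_IFACES = {"ItemProcessor"}
--
-- BATCH_WRITER_IFACES    = {"ItemWriter", "ItemStreamWriter", "FlatFileItemWriter",
--                            "JdbcBatchItemWriter", "JpaItemWriter",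
--                            "RepositoryItemWriter"}
--
-- BATCH_SCOPE_ANNOTATIONS = {"JobScope", "StepScope"}
--
-- def _detect_batch_role(ann_names: set, implements_names: list) -> str | None:
--     """
--     Return the Spring Batch role of a class, or None if it is not a batch component.
--     Checks both implements list (for reader/processor/writer) and
--     annotations (for @JobScope / @StepScope beans).
--     """
--     impl_set = set(implements_names)
--     if impl_set & BATCH_READER_IFACES or any(
--         i in name for name in implements_names for i in ("ItemReader",)
--     ):
--         return "batch_reader"
--     if impl_set & BATCH_PROCESSOR_IFACES or any(
--         "ItemProcessor" in name for name in implements_names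
--     ):
--         return "batch_processor"
--     if impl_set & BATCH_WRITER_IFACES or any(
--         i in name for name in implements_names for i in ("ItemWriter",)
--     ):
--         return "batch_writer"
--     if ann_names & BATCH_SCOPE_ANNOTATIONS:
--         return "batch_scoped"
--     return None
-- ===== SOURCE B (Python) =====
-- BATCH_SCOPE_ANNOTATIONS = {"JobScope", "StepScope"}
--
-- def _detect_batch_role(ann_names: set, implements_names: list) -> str | None:
--     """Single pass over implements_names with one found-flag per role, then a
--     priority decision (reader > processor > writer), then the scope check.
--     A name counts for a role if it contains the role's substring, or is the
--     one known interface per role that does not ('ItemStreamReader'/'ItemStreamWriter')."""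
--     reader = processor = writer = False
--     for name in implements_names:
--         reader = reader or "ItemReader" in name or name == "ItemStreamReader"
--         processor = processor or "ItemProcessor" in name
--         writer = writer or "ItemWriter" in name or name == "ItemStreamWriter"
--     if reader:
--         return "batch_reader"
--     if processor:
--         return "batch_processor"
--     if writer:
--         return "batch_writer"
--     if not ann_names.isdisjoint(BATCH_SCOPE_ANNOTATIONS):
--         return "batch_scoped"
--     return None
-- ===== Notes on version B (the rewrite author's own statement) =====
-- stated objective: simpler
-- what changed: Replaced A's three set-intersection tests plus three separate any(...) scans over implements_names with a single pass maintaining one found-flag per role (folding the exact-interface sets into per-name predicates), followed by a fixed reader>processor>writer priority decision and the scope-annotation check.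
import Mathlib
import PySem

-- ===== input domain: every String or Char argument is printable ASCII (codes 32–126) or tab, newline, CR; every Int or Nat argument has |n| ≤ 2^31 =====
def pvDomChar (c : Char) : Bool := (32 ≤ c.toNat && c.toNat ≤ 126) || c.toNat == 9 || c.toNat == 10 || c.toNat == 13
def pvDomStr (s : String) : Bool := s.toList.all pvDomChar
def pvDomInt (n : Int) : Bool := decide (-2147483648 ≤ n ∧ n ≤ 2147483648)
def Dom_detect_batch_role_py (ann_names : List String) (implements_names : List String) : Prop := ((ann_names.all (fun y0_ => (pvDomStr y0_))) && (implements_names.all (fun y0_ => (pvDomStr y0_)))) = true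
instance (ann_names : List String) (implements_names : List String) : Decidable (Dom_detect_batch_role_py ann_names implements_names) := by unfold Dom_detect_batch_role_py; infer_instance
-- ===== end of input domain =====

-- B replaces A's set intersections and three separate any(...) scans with a single pass
-- over implements_names maintaining one found-flag per role, then a priority decision (objective: simpler).

-- ===== PORT A =====
def pvReaderIfaces : List String := ["ItemReader", "ItemStreamReader", "FlatFileItemReader", "JdbcCursorItemReader", "JpaPagingItemReader", "JdbcPagingItemReader", "RepositoryItemReader"]
def pvProcessorIfaces : List String := ["ItemProcessor"]
def pvWriterIfaces : List String := ["ItemWriter", "ItemStreamWriter", "FlatFileItemWriter", "JdbcBatchItemWriter", "JpaItemWriter", "RepositoryItemWriter"]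
def pvScopeAnns : List String := ["JobScope", "StepScope"]

def detect_batch_role_py (ann_names : List String) (implements_names : List String) : Option String :=
  let impl_set : PySem.Set String := PySem.Set.ofList implements_names
  if !(PySem.Set.inter impl_set pvReaderIfaces).isEmpty
      || implements_names.any (fun name => ["ItemReader"].any (fun i => PySem.Str.isIn i name)) then
    some "batch_reader"
  else if !(PySem.Set.inter impl_set pvProcessorIfaces).isEmpty
      || implements_names.any (fun name => PySem.Str.isIn "ItemProcessor" name) then
    some "batch_processor"
  else if !(PySem.Set.inter impl_set pvWriterIfaces).isEmpty
      || implements_names.any (fun name => ["ItemWriter"].any (fun i => PySem.Str.isIn i name)) then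
    some "batch_writer"
  else if !(PySem.Set.inter ann_names pvScopeAnns).isEmpty then
    some "batch_scoped"
  else
    none

-- ===== PORT B =====
def detect_batch_role_py_alt (ann_names : List String) (implements_names : List String) : Option String :=
  let flags := implements_names.foldl
    (fun (st : Bool × Bool × Bool) name =>
      (st.1 || PySem.Str.isIn "ItemReader" name || name == "ItemStreamReader",
       st.2.1 || PySem.Str.isIn "ItemProcessor" name,
       st.2.2 || PySem.Str.isIn "ItemWriter" name || name == "ItemStreamWriter"))
    (false, false, false)
  if flags.1 then some "batch_reader"
  else if flags.2.1 then some "batch_processor"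
  else if flags.2.2 then some "batch_writer"
  else if !(PySem.Set.isdisjoint ann_names pvScopeAnns) then some "batch_scoped"
  else none

-- ===== PRECONDITION & SPEC =====
def Spec_detect_batch_role_py (ann_names : List String) (implements_names : List String) (out : Option String) : Prop := out = detect_batch_role_py_alt ann_names implements_names
instance (ann_names : List String) (implements_names : List String) (out : Option String) : Decidable (Spec_detect_batch_role_py ann_names implements_names out) := by unfold Spec_detect_batch_role_py; infer_instance

-- ===== CLAIM (what is proved, stated in full; the proofs are below) =====
def Claim_equal_detect_batch_role_py : Prop := ∀ (ann_names : List String) (implements_names : List String), Dom_detect_batch_role_py ann_names implements_names → Spec_detect_batch_role_py ann_names implements_names (detect_batch_role_py ann_names implements_names)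

-- ===== LEMMAS AND PROOFS =====

-- the per-name predicates of B's single pass
def pvPr (name : String) : Bool := PySem.Str.isIn "ItemReader" name || name == "ItemStreamReader"
def pvPp (name : String) : Bool := PySem.Str.isIn "ItemProcessor" name
def pvPw (name : String) : Bool := PySem.Str.isIn "ItemWriter" name || name == "ItemStreamWriter"

-- B's fold computes the three any's
theorem pv_fold_eq (l : List String) (r p w : Bool) :
    l.foldl (fun (st : Bool × Bool × Bool) name =>
      (st.1 || PySem.Str.isIn "ItemReader" name || name == "ItemStreamReader",
       st.2.1 || PySem.Str.isIn "ItemProcessor" name,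
       st.2.2 || PySem.Str.isIn "ItemWriter" name || name == "ItemStreamWriter")) (r, p, w)
      = (r || l.any pvPr, p || l.any pvPp, w || l.any pvPw) := by
  induction l generalizing r p w with
  | nil => simp
  | cons x t ih => rw [List.foldl_cons, ih]; simp [pvPr, pvPp, pvPw, Bool.or_assoc]

-- a nonempty-intersection test as an existential
theorem pv_inter_nonempty (s t : PySem.Set String) :
    (!(PySem.Set.inter s t).isEmpty) = true ↔ ∃ n, n ∈ s ∧ n ∈ t := by
  rw [Bool.not_eq_true', List.isEmpty_eq_false_iff_exists_mem]
  constructor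
  · rintro ⟨n, hn⟩
    exact ⟨n, (PySem.Set.mem_inter s t n).mp hn⟩
  · rintro ⟨n, hs, ht⟩
    exact ⟨n, (PySem.Set.mem_inter s t n).mpr ⟨hs, ht⟩⟩

theorem pv_reader_cond (impl : List String) :
    (!(PySem.Set.inter (PySem.Set.ofList impl) pvReaderIfaces).isEmpty
      || impl.any (fun name => ["ItemReader"].any (fun i => PySem.Str.isIn i name)))
      = impl.any pvPr := by
  rw [Bool.eq_iff_iff, Bool.or_eq_true, pv_inter_nonempty]
  simp only [PySem.Set.mem_ofList, List.any_eq_true, List.any_cons, List.any_nil, Bool.or_false]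
  constructor
  · rintro (⟨n, hn, hif⟩ | ⟨n, hn, hi⟩)
    · refine ⟨n, hn, ?_⟩
      simp only [pvReaderIfaces, List.mem_cons, List.not_mem_nil, or_false] at hif
      rcases hif with h | h | h | h | h | h | h <;> subst h <;> decide
    · refine ⟨n, hn, ?_⟩
      simp only [pvPr, Bool.or_eq_true]
      left; simpa using hi
  · rintro ⟨n, hn, hp⟩
    simp only [pvPr, Bool.or_eq_true, beq_iff_eq] at hp
    rcases hp with h | h
    · exact Or.inr ⟨n, hn, h⟩
    · exact Or.inl ⟨n, hn, by simp [pvReaderIfaces, h]⟩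

theorem pv_processor_cond (impl : List String) :
    (!(PySem.Set.inter (PySem.Set.ofList impl) pvProcessorIfaces).isEmpty
      || impl.any (fun name => PySem.Str.isIn "ItemProcessor" name))
      = impl.any pvPp := by
  rw [Bool.eq_iff_iff, Bool.or_eq_true, pv_inter_nonempty]
  simp only [PySem.Set.mem_ofList, List.any_eq_true]
  constructor
  · rintro (⟨n, hn, hif⟩ | ⟨n, hn, hi⟩)
    · refine ⟨n, hn, ?_⟩
      simp only [pvProcessorIfaces, List.mem_cons, List.not_mem_nil, or_false] at hif
      subst hif; decide
    · exact ⟨n, hn, hi⟩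
  · rintro ⟨n, hn, hp⟩
    exact Or.inr ⟨n, hn, hp⟩

theorem pv_writer_cond (impl : List String) :
    (!(PySem.Set.inter (PySem.Set.ofList impl) pvWriterIfaces).isEmpty
      || impl.any (fun name => ["ItemWriter"].any (fun i => PySem.Str.isIn i name)))
      = impl.any pvPw := by
  rw [Bool.eq_iff_iff, Bool.or_eq_true, pv_inter_nonempty]
  simp only [PySem.Set.mem_ofList, List.any_eq_true, List.any_cons, List.any_nil, Bool.or_false]
  constructor
  · rintro (⟨n, hn, hif⟩ | ⟨n, hn, hi⟩)
    · refine ⟨n, hn, ?_⟩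
      simp only [pvWriterIfaces, List.mem_cons, List.not_mem_nil, or_false] at hif
      rcases hif with h | h | h | h | h | h <;> subst h <;> decide
    · refine ⟨n, hn, ?_⟩
      simp only [pvPw, Bool.or_eq_true]
      left; simpa using hi
  · rintro ⟨n, hn, hp⟩
    simp only [pvPw, Bool.or_eq_true, beq_iff_eq] at hp
    rcases hp with h | h
    · exact Or.inr ⟨n, hn, h⟩
    · exact Or.inl ⟨n, hn, by simp [pvWriterIfaces, h]⟩

-- the scope test: A's nonempty intersection = B's negated isdisjoint
theorem pv_scope_cond (ann : List String) :
    (!(PySem.Set.inter ann pvScopeAnns).isEmpty) = (!(PySem.Set.isdisjoint ann pvScopeAnns)) := by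
  rw [Bool.eq_iff_iff, pv_inter_nonempty, Bool.not_eq_true', Bool.eq_false_iff, Ne,
    PySem.Set.isdisjoint_iff]
  push Not
  simp

-- ===== VERDICT (by name: the statement is the Claim_ definition above) =====
theorem detect_batch_role_py_spec : Claim_equal_detect_batch_role_py := by
  intro ann_names implements_names _
  unfold Spec_detect_batch_role_py detect_batch_role_py detect_batch_role_py_alt
  rw [pv_fold_eq]
  simp only [Bool.false_or]
  rw [pv_reader_cond, pv_processor_cond, pv_writer_cond, pv_scope_cond]
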